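-- pv_equiv track=rewrite | github.com/mathornton01/steer-framework | src/python-tests/pearl-causal-model/pearl_causal_model_test.py | build_state_transition_graph
-- ===== SOURCE A (Python) =====
-- def build_state_transition_graph(sequence, state_bits):
--     """Build a directed edge set from a sliding window over the sequence."""
--     edges = set()
--     if len(sequence) < state_bits + 1:
--         return edges
--     for i in range(len(sequence) - state_bits):
--         src = tuple(sequence[i:i + state_bits])
--         dst = tuple(sequence[i + 1:i + state_bits + 1])
--         edges.add((src, dst))
--     return edges
-- ===== SOURCE B (Python) =====
-- def build_state_transition_graph(sequence, state_bits):
--     """Single pass that maintains the current window incrementally (push one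
--     element, drop the oldest) instead of extracting two slices per position."""
--     edges = set()
--     if state_bits < 0 or len(sequence) <= state_bits:
--         return edges
--     window = tuple(sequence[:state_bits])
--     for x in sequence[state_bits:]:
--         nxt = (window + (x,))[1:]
--         edges.add((window, nxt))
--         window = nxt
--     return edges
-- ===== Notes on version B (the rewrite author's own statement) =====
-- stated objective: alternative
-- what changed: B replaces A's index loop that extracts two overlapping slices per position with a single pass over the suffix that maintains the current window incrementally (append the new element, drop the oldest) and pairs the carried previous window with the updated one.
-- intended difference: For negative state_bits A's slice bounds wrap around Python-style and it returns a set of accidental edges (always nonempty, e.g. {((),())} on the empty sequence), while B returns the empty set, the intended value since there are no windows of negative length. — e.g. on build_state_transition_graph([], -1): A returns [([], [])], B returns []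
import Mathlib
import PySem

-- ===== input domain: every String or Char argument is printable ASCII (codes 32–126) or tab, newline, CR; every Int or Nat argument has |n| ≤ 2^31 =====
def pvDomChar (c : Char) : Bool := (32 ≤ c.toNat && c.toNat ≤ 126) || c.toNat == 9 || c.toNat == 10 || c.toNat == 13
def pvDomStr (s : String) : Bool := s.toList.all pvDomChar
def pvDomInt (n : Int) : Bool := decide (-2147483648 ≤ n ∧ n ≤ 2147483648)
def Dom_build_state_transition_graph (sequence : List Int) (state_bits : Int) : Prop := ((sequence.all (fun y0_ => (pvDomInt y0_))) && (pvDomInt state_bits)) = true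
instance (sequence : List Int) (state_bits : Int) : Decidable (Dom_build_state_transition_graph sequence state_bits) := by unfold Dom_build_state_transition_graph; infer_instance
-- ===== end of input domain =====

-- B maintains the sliding window incrementally in a single pass over the suffix
-- (append the new element, drop the oldest) instead of A's index loop extracting two
-- overlapping slices per position; for negative state_bits B returns the empty set
-- (intended difference D_ below).

-- ===== PORT A =====
def build_state_transition_graph (sequence : List Int) (state_bits : Int) : List (List Int × List Int) :=
  if (sequence.length : Int) < state_bits + 1 then PySem.Set.empty
  else
    (PySem.List.pyRange 0 ((sequence.length : Int) - state_bits) 1).foldl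
      (fun edges i =>
        PySem.Set.add edges
          (PySem.List.slice sequence (some i) (some (i + state_bits)),
           PySem.List.slice sequence (some (i + 1)) (some (i + state_bits + 1))))
      PySem.Set.empty

-- ===== PORT B =====
def build_state_transition_graph_alt (sequence : List Int) (state_bits : Int) : List (List Int × List Int) :=
  if state_bits < 0 ∨ (sequence.length : Int) ≤ state_bits then []
  else
    let w0 := PySem.List.slice sequence none (some state_bits)
    let rest := PySem.List.slice sequence (some state_bits) none
    (rest.foldl
      (fun (st : List (List Int × List Int) × List Int) x =>
        let nxt := PySem.List.slice (st.2 ++ [x]) (some 1) none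
        (PySem.Set.add st.1 (st.2, nxt), nxt))
      (([] : List (List Int × List Int)), w0)).1

-- ===== PRECONDITION & SPEC =====
-- For negative state_bits A's slice bounds wrap around Python-style and it returns a
-- nonempty set of accidental edges (e.g. {((),())} on the empty sequence), while B
-- returns the empty set — the intended value, since no window of negative length exists.
def D_build_state_transition_graph (sequence : List Int) (state_bits : Int) : Prop := state_bits < 0
instance (sequence : List Int) (state_bits : Int) : Decidable (D_build_state_transition_graph sequence state_bits) := by unfold D_build_state_transition_graph; infer_instance

def Spec_build_state_transition_graph (sequence : List Int) (state_bits : Int) (out : List (List Int × List Int)) : Prop := ¬ D_build_state_transition_graph sequence state_bits → out = build_state_transition_graph_alt sequence state_bits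
instance (sequence : List Int) (state_bits : Int) (out : List (List Int × List Int)) : Decidable (Spec_build_state_transition_graph sequence state_bits out) := by unfold Spec_build_state_transition_graph; infer_instance

def pvDiffWitness_build_state_transition_graph : List Int × Int := ([], -1)
def pvDiffWitnessOut_build_state_transition_graph : (List (List Int × List Int)) × (List (List Int × List Int)) := ([([], [])], [])

-- ===== CLAIM (what is proved, stated in full; the proofs are below) =====
def Claim_unchanged_build_state_transition_graph : Prop := ∀ (sequence : List Int) (state_bits : Int), Dom_build_state_transition_graph sequence state_bits → Spec_build_state_transition_graph sequence state_bits (build_state_transition_graph sequence state_bits)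
def Claim_changed_build_state_transition_graph : Prop := Dom_build_state_transition_graph (pvDiffWitness_build_state_transition_graph.1) (pvDiffWitness_build_state_transition_graph.2) ∧ D_build_state_transition_graph (pvDiffWitness_build_state_transition_graph.1) (pvDiffWitness_build_state_transition_graph.2) ∧ build_state_transition_graph (pvDiffWitness_build_state_transition_graph.1) (pvDiffWitness_build_state_transition_graph.2) = pvDiffWitnessOut_build_state_transition_graph.1 ∧ build_state_transition_graph_alt (pvDiffWitness_build_state_transition_graph.1) (pvDiffWitness_build_state_transition_graph.2) = pvDiffWitnessOut_build_state_transition_graph.2 ∧ pvDiffWitnessOut_build_state_transition_graph.1 ≠ pvDiffWitnessOut_build_state_transition_graph.2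
def Claim_exact_build_state_transition_graph : Prop := ∀ (sequence : List Int) (state_bits : Int), Dom_build_state_transition_graph sequence state_bits → D_build_state_transition_graph sequence state_bits → build_state_transition_graph sequence state_bits ≠ build_state_transition_graph_alt sequence state_bits

-- ===== LEMMAS AND PROOFS =====

-- the sliding window of width K at position t
def pvWin (sequence : List Int) (K t : Nat) : List Int := (sequence.drop t).take K

-- sliding the window one step: append the next element, drop the oldest
theorem pvWin_step (sequence : List Int) (K t : Nat) (h : K + t < sequence.length) :
    (pvWin sequence K t ++ [sequence[K + t]]).tail = pvWin sequence K (t + 1) := by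
  unfold pvWin
  have hlen : K < (sequence.drop t).length := by simp; omega
  have hget : (sequence.drop t)[K] = sequence[K + t] := by
    rw [List.getElem_drop]; congr 1; omega
  have h1 : (sequence.drop t).take K ++ [sequence[K + t]] = (sequence.drop t).take (K + 1) := by
    rw [List.take_add_one, List.getElem?_eq_getElem hlen, hget]; simp
  have h2 : ((sequence.drop t).take (K + 1)).tail = (sequence.drop t).tail.take K := by
    cases sequence.drop t <;> simp
  rw [h1, h2, List.tail_drop]

-- B's incremental fold produces the same edges as indexing positions t, t+1, …
theorem pvAlt_fold (sequence : List Int) (K : Nat) (t : Nat) (acc : List (List Int × List Int)) :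
    ((sequence.drop (K + t)).foldl
      (fun (st : List (List Int × List Int) × List Int) x =>
        ((PySem.Set.add st.1 (st.2, (st.2 ++ [x]).tail)), (st.2 ++ [x]).tail))
      (acc, pvWin sequence K t)).1
    = (List.range' t (sequence.length - (K + t))).foldl
        (fun e u => PySem.Set.add e (pvWin sequence K u, pvWin sequence K (u + 1))) acc := by
  by_cases h : sequence.length ≤ K + t
  · rw [List.drop_eq_nil_of_le h, Nat.sub_eq_zero_of_le h]
    simp
  · push Not at h
    rw [List.drop_eq_getElem_cons h]
    have hr : sequence.length - (K + t) = (sequence.length - (K + (t + 1))) + 1 := by omega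
    rw [hr, List.range'_succ]
    simp only [List.foldl_cons]
    rw [pvWin_step sequence K t h]
    have := pvAlt_fold sequence K (t + 1)
      (PySem.Set.add acc (pvWin sequence K t, pvWin sequence K (t + 1)))
    rw [← Nat.add_assoc] at this
    exact this
termination_by sequence.length - (K + t)

-- folding Set.add never empties a set, and fills it from a nonempty list
theorem pvFoldl_add_ne_nil {α : Type} [BEq α] (l : List α) (s : List α)
    (h : s ≠ [] ∨ l ≠ []) :
    l.foldl PySem.Set.add s ≠ [] := by
  induction l generalizing s with
  | nil => simpa using h.resolve_right (by simp)
  | cons x xs ih =>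
    simp only [List.foldl_cons]
    refine ih _ (Or.inl ?_)
    simp only [PySem.Set.add]
    split_ifs with hx
    · rintro rfl; simp at hx
    · simp

-- ===== VERDICT (by name: the statement is the Claim_ definition above) =====
theorem build_state_transition_graph_spec : Claim_unchanged_build_state_transition_graph := by
  intro sequence state_bits _ hD
  unfold D_build_state_transition_graph at hD
  push Not at hD
  obtain ⟨K, rfl⟩ := Int.eq_ofNat_of_zero_le hD
  unfold build_state_transition_graph build_state_transition_graph_alt
  by_cases hg : (sequence.length : Int) ≤ (K : Int)
  · rw [if_pos (by omega), if_pos (Or.inr hg)]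
    rfl
  · push Not at hg
    have hKn : K < sequence.length := by exact_mod_cast hg
    rw [if_neg (by omega), if_neg (by omega)]
    simp only [PySem.List.slice_to_natCast, PySem.List.slice_from_natCast,
      PySem.List.slice_from_one]
    have hcast : (sequence.length : Int) - (K : Int) = ((sequence.length - K : Nat) : Int) := by
      omega
    rw [hcast, PySem.List.pyRange_zero_natCast, List.foldl_map]
    have hB := pvAlt_fold sequence K 0 []
    simp only [Nat.add_zero] at hB
    have hw0 : pvWin sequence K 0 = sequence.take K := by simp [pvWin]
    rw [hw0] at hB
    rw [hB, ← List.range_eq_range']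
    congr 1
    funext edges k
    have e1 : ((k : Int) + 1) = (((k + 1 : Nat)) : Int) := by push_cast; ring
    have e2 : ((k : Int) + (K : Int) + 1) = (((k + 1 : Nat)) : Int) + (K : Int) := by
      push_cast; ring
    rw [e1, e2, PySem.List.slice_natCast_add, PySem.List.slice_natCast_add]
    rfl

theorem build_state_transition_graph_changed : Claim_changed_build_state_transition_graph := by
  unfold Claim_changed_build_state_transition_graph; decide

theorem build_state_transition_graph_tight : Claim_exact_build_state_transition_graph := by
  intro sequence state_bits _ hD
  unfold D_build_state_transition_graph at hD
  unfold build_state_transition_graph build_state_transition_graph_alt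
  rw [if_pos (Or.inl hD), if_neg (by omega)]
  rw [← List.foldl_map]
  apply pvFoldl_add_ne_nil
  right
  apply List.ne_nil_of_length_pos
  rw [List.length_map, PySem.List.length_pyRange_one]
  omega
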